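-- pv_equiv track=rewrite | github.com/Rusca8/davidrusca.com | crypto.py | cesarhtml
-- ===== SOURCE A (Python) =====
-- def cesarhtml(text, key):
--     in_tag = False
--     if key == 0:  # 0
--         return text
--     else:
--         text = text.replace("á", chr(97)).replace("é", "e").replace("í", "i").replace("ó", "o").replace("ú", "u")\
--             .replace("Á", "A").replace("É", "E").replace("Í", "I").replace("Ó", "O").replace("Ú", "U")\
--             .replace("ñ", "n").replace("Ñ", "N")
--         cipher = ""
--         for x in range(len(text)):
--             if in_tag:
--                 if text[x] == ">":
--                     in_tag = False
--                 cipher += text[x]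
--             else:
--                 if text[x] == "<":
--                     in_tag = True
--                     cipher += text[x]
--                 else:
--                     if text[x].isalpha():
--                         if text[x].islower():
--                             cipher += chr((ord(text[x]) - 97 + key) % 26 + 97)
--                         else:
--                             cipher += chr((ord(text[x]) - 65 + key) % 26 + 65)
--                     elif text[x].isnumeric():
--                         cipher += f"{(int(text[x]) + key) % 10}"
--                     else:
--                         cipher += text[x]
--         return cipher
-- ===== SOURCE B (Python) =====
-- def _enc(c, key):
--     if c.isalpha():
--         if c.islower():
--             return chr((ord(c) - 97 + key) % 26 + 97)
--         return chr((ord(c) - 65 + key) % 26 + 65)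
--     if c.isnumeric():
--         return f"{(int(c) + key) % 10}"
--     return c
--
--
-- def cesarhtml(text, key):
--     if key == 0:
--         return text
--     text = text.replace("á", chr(97)).replace("é", "e").replace("í", "i").replace("ó", "o").replace("ú", "u")\
--         .replace("Á", "A").replace("É", "E").replace("Í", "I").replace("Ó", "O").replace("Ú", "U")\
--         .replace("ñ", "n").replace("Ñ", "N")
--     out = []
--     i, n = 0, len(text)
--     while i < n:
--         if text[i] == "<":
--             # tag token: everything up to and including the next '>', or to the end
--             j = text.find(">", i)
--             j = n if j == -1 else j + 1
--             out.append(text[i:j])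
--         else:
--             # text token: up to the next '<', ciphered per character
--             j = text.find("<", i)
--             if j == -1:
--                 j = n
--             out.append("".join(_enc(c, key) for c in text[i:j]))
--         i = j
--     return "".join(out)
-- ===== Notes on version B (the rewrite author's own statement) =====
-- stated objective: alternative
-- what changed: Replaces the char-by-char loop with an in_tag boolean flag by a segment tokenizer: the string is cut into whole tag tokens ('<' up to the next '>' or the end, found with str.find) emitted verbatim and in-between text tokens ciphered per character.
import Mathlib
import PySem

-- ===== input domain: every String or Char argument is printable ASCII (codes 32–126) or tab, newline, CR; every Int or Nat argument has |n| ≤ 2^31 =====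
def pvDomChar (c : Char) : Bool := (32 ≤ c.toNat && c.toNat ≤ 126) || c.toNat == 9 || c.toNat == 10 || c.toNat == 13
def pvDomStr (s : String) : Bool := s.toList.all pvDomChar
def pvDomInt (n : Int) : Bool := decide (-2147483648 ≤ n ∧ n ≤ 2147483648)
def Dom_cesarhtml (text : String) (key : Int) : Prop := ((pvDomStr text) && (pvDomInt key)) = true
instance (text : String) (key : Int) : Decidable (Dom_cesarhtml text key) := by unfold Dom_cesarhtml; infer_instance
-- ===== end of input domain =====

-- B replaces A's char-by-char loop with an in_tag flag by a segment tokenizer (tag tokens verbatim,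
-- text tokens ciphered per character); same return value, no speed claim.

-- ===== PORT A =====
-- the accent-normalizing .replace() chain of A (and of B, which repeats it verbatim)
def pvReplChain (cs : List Char) : List Char :=
  PySem.Chars.replace (PySem.Chars.replace (PySem.Chars.replace (PySem.Chars.replace
  (PySem.Chars.replace (PySem.Chars.replace (PySem.Chars.replace (PySem.Chars.replace
  (PySem.Chars.replace (PySem.Chars.replace (PySem.Chars.replace (PySem.Chars.replace
    cs "á".toList [Char.ofNat 97]) "é".toList "e".toList) "í".toList "i".toList)
    "ó".toList "o".toList) "ú".toList "u".toList) "Á".toList "A".toList)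
    "É".toList "E".toList) "Í".toList "I".toList) "Ó".toList "O".toList)
    "Ú".toList "U".toList) "ñ".toList "n".toList) "Ñ".toList "N".toList

-- one loop step of A: state = (in_tag, cipher); `isnumeric` ported as isdigit (exact on the ASCII Dom);
-- int(text[x]) is guarded by the digit test, so ofChars? is `some` there and getD 0 is never the default
def pvStepA (key : Int) (st : Bool × List Char) (c : Char) : Bool × List Char :=
  if st.1 then
    (if c = '>' then false else st.1, st.2 ++ [c])
  else
    if c = '<' then (true, st.2 ++ [c])
    else
      if PySem.Chars.isalpha c then
        if PySem.Chars.islower c then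
          (st.1, st.2 ++ [Char.ofNat (PySem.Int.mod ((c.toNat : Int) - 97 + key) 26 + 97).toNat])
        else
          (st.1, st.2 ++ [Char.ofNat (PySem.Int.mod ((c.toNat : Int) - 65 + key) 26 + 65).toNat])
      else if PySem.Chars.isdigit c then
        (st.1, st.2 ++ PySem.Int.toChars (PySem.Int.mod ((PySem.Int.ofChars? [c]).getD 0 + key) 10))
      else (st.1, st.2 ++ [c])

def cesarhtml (text : String) (key : Int) : String :=
  if key = 0 then text
  else String.ofList ((pvReplChain text.toList).foldl (pvStepA key) (false, [])).2

-- ===== PORT B =====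
-- per-character cipher of Source B's _enc (isnumeric as isdigit, exact on the ASCII Dom; int guarded by it)
def pvEncB (c : Char) (key : Int) : List Char :=
  if PySem.Chars.isalpha c then
    if PySem.Chars.islower c then
      [Char.ofNat (PySem.Int.mod ((c.toNat : Int) - 97 + key) 26 + 97).toNat]
    else
      [Char.ofNat (PySem.Int.mod ((c.toNat : Int) - 65 + key) 26 + 65).toNat]
  else if PySem.Chars.isdigit c then
    PySem.Int.toChars (PySem.Int.mod ((PySem.Int.ofChars? [c]).getD 0 + key) 10)
  else [c]

-- Source B's while loop: cut off one token per step ('<'…'>' tag verbatim / text run ciphered) and recurse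
def pvTokB (key : Int) : List Char → List Char
  | [] => []
  | c :: cs =>
    if c = '<' then
      let body := cs.takeWhile (fun d => d ≠ '>')
      let rest := cs.drop body.length
      if rest = [] then c :: body
      else (c :: body ++ ['>']) ++ pvTokB key rest.tail
    else
      let seg := (c :: cs).takeWhile (fun d => d ≠ '<')
      seg.flatMap (fun d => pvEncB d key) ++ pvTokB key ((c :: cs).drop seg.length)
  termination_by cs => cs.length
  decreasing_by
  · simp only [List.length_tail, List.length_drop, List.length_cons]
    omega
  · rename_i h
    have htw : ((c :: cs).takeWhile (fun d => d ≠ '<')).length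
        = (cs.takeWhile (fun d => d ≠ '<')).length + 1 := by
      simp [h]
    simp only [List.length_drop, List.length_cons, htw]
    have h1 : (cs.takeWhile (fun d => d ≠ '<')).length ≤ cs.length := (List.takeWhile_sublist _).length_le
    omega

def cesarhtml_alt (text : String) (key : Int) : String :=
  if key = 0 then text
  else String.ofList (pvTokB key (pvReplChain text.toList))

-- ===== PRECONDITION & SPEC =====
def Spec_cesarhtml (text : String) (key : Int) (out : String) : Prop := out = cesarhtml_alt text key
instance (text : String) (key : Int) (out : String) : Decidable (Spec_cesarhtml text key out) := by unfold Spec_cesarhtml; infer_instance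

-- ===== CLAIM (what is proved, stated in full; the proofs are below) =====
def Claim_equal_cesarhtml : Prop := ∀ (text : String) (key : Int), Dom_cesarhtml text key → Spec_cesarhtml text key (cesarhtml text key)

-- ===== LEMMAS AND PROOFS =====

-- dropping past the takeWhile prefix is dropWhile
theorem pvDrop_takeWhile (p : Char → Bool) (l : List Char) :
    l.drop (l.takeWhile p).length = l.dropWhile p := by
  induction l with
  | nil => simp
  | cons c cs ih => by_cases h : p c <;> simp [h, ih]

-- one-step unfoldings of pvStepA on each flag value
theorem pvStepA_true (key : Int) (acc : List Char) (c : Char) :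
    pvStepA key (true, acc) c = ((if c = '>' then false else true), acc ++ [c]) := by
  simp [pvStepA]

theorem pvStepA_false (key : Int) (acc : List Char) (c : Char) (hc : c ≠ '<') :
    pvStepA key (false, acc) c = (false, acc ++ pvEncB c key) := by
  simp only [pvStepA, pvEncB, Bool.false_eq_true, if_false, if_neg hc]
  split_ifs <;> simp

-- the accumulator string of A's loop is a prefix: fold from (b, acc) = acc ++ fold from (b, [])
theorem pvStepA_acc (key : Int) (cs : List Char) (b : Bool) (acc : List Char) :
    cs.foldl (pvStepA key) (b, acc)
      = ((cs.foldl (pvStepA key) (b, [])).1, acc ++ (cs.foldl (pvStepA key) (b, [])).2) := by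
  induction cs generalizing b acc with
  | nil => simp
  | cons c cs ih =>
    simp only [List.foldl_cons]
    rw [ih, ih (pvStepA key (b, []) c).1 (pvStepA key (b, []) c).2]
    have : (pvStepA key (b, acc) c).1 = (pvStepA key (b, []) c).1 ∧
        (pvStepA key (b, acc) c).2 = acc ++ (pvStepA key (b, []) c).2 := by
      simp only [pvStepA]; split_ifs <;> simp
    rw [this.1, this.2]; simp

-- while in_tag, characters other than '>' are copied and the flag stays set
theorem pvFoldA_tag (key : Int) (body : List Char) (h : ∀ d ∈ body, d ≠ '>') (acc : List Char) :
    body.foldl (pvStepA key) (true, acc) = (true, acc ++ body) := by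
  induction body generalizing acc with
  | nil => simp
  | cons c cs ih =>
    have hc : c ≠ '>' := h c (by simp)
    simp only [List.foldl_cons, pvStepA_true, if_neg hc]
    rw [ih (fun d hd => h d (by simp [hd]))]
    simp

-- outside a tag, characters other than '<' are ciphered and the flag stays clear
theorem pvFoldA_text (key : Int) (seg : List Char) (h : ∀ d ∈ seg, d ≠ '<') (acc : List Char) :
    seg.foldl (pvStepA key) (false, acc) = (false, acc ++ seg.flatMap (fun d => pvEncB d key)) := by
  induction seg generalizing acc with
  | nil => simp
  | cons c cs ih =>
    have hc : c ≠ '<' := h c (by simp)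
    simp only [List.foldl_cons, pvStepA_false key acc c hc]
    rw [ih (fun d hd => h d (by simp [hd]))]
    simp

-- the heart of the file: A's flag loop equals B's tokenizer on every character list
theorem pvLoop_eq_tok (key : Int) (cs : List Char) :
    (cs.foldl (pvStepA key) (false, [])).2 = pvTokB key cs := by
  induction hn : cs.length using Nat.strong_induction_on generalizing cs with
  | _ n ih =>
  match cs with
  | [] => simp [pvTokB]
  | c :: cs =>
    by_cases h : c = '<'
    · subst h
      have hbody : ∀ d ∈ cs.takeWhile (fun d => d ≠ '>'), d ≠ '>' := by
        intro d hd
        have := List.mem_takeWhile_imp hd; simpa using this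
      have hsplit : cs = cs.takeWhile (fun d => d ≠ '>') ++ cs.drop (cs.takeWhile (fun d => d ≠ '>')).length := by
        rw [pvDrop_takeWhile]
        exact (List.takeWhile_append_dropWhile).symm
      have hstep0 : pvStepA key (false, ([] : List Char)) '<' = (true, ['<']) := by
        simp [pvStepA]
      rw [pvTokB]
      match hr : cs.drop (cs.takeWhile (fun d => d ≠ '>')).length with
      | [] =>
        conv_lhs => rw [hsplit, hr]
        simp only [List.append_nil, List.foldl_cons, hstep0]
        rw [pvFoldA_tag key _ hbody]
        simp
        simpa using List.drop_eq_nil_iff.mp hr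
      | r :: rs =>
        have hrgt : r = '>' := by
          have hdw := hr
          rw [pvDrop_takeWhile] at hdw
          have h1 := List.head_dropWhile_not (fun d => d ≠ '>') (l := cs) (by rw [hdw]; simp)
          have h2 : (cs.dropWhile (fun d => d ≠ '>')).head (by rw [hdw]; simp) = r := by simp only [hdw, List.head_cons]
          rw [h2] at h1
          simpa using h1
        subst hrgt
        conv_lhs => rw [hsplit, hr]
        simp only [List.foldl_cons, List.foldl_append, hstep0]
        rw [pvFoldA_tag key _ hbody]
        have hstep1 : pvStepA key (true, '<' :: cs.takeWhile (fun d => d ≠ '>')) '>'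
            = (false, ('<' :: cs.takeWhile (fun d => d ≠ '>')) ++ ['>']) := by
          simp [pvStepA_true]
        simp only [List.cons_append, List.nil_append, hstep1]
        rw [pvStepA_acc, ih rs.length (by
            have h1 : (cs.drop (cs.takeWhile (fun d => d ≠ '>')).length).length ≤ cs.length := by
              rw [List.length_drop]; omega
            rw [hr] at h1; simp at h1
            simp only [← hn, List.length_cons]
            omega) rs rfl]
        rw [hr]
        simp
    · -- text token
      have hseg : (c :: cs).takeWhile (fun d => d ≠ '<') = c :: cs.takeWhile (fun d => d ≠ '<') := by
        simp [h]
      have hsegne : ∀ d ∈ (c :: cs).takeWhile (fun d => d ≠ '<'), d ≠ '<' := by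
        intro d hd
        have := List.mem_takeWhile_imp hd; simpa using this
      have hsplit : c :: cs = (c :: cs).takeWhile (fun d => d ≠ '<')
          ++ (c :: cs).drop ((c :: cs).takeWhile (fun d => d ≠ '<')).length := by
        rw [pvDrop_takeWhile]
        exact (List.takeWhile_append_dropWhile).symm
      rw [pvTokB]
      simp only [if_neg h]
      conv_lhs => rw [hsplit]
      rw [List.foldl_append, pvFoldA_text key _ hsegne, pvStepA_acc,
        ih ((c :: cs).drop ((c :: cs).takeWhile (fun d => d ≠ '<')).length).length (by
          rw [hseg]
          simp only [← hn, List.length_cons, List.drop_succ_cons]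
          have h1 : (cs.drop (cs.takeWhile (fun d => d ≠ '<')).length).length ≤ cs.length := by
            rw [List.length_drop]; omega
          omega) _ rfl]
      simp

-- ===== VERDICT (by name: the statement is the Claim_ definition above) =====
theorem cesarhtml_spec : Claim_equal_cesarhtml := by
  intro text key _
  unfold Spec_cesarhtml cesarhtml cesarhtml_alt
  by_cases hk : key = 0
  · simp [hk]
  · simp only [if_neg hk]
    rw [pvLoop_eq_tok]
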